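-- pv_equiv track=rewrite | github.com/a6m1n/rates | v6/auto_top_point/week/week.py | read_bfd_all
-- ===== SOURCE A (Python) =====
-- def read_bfd_all(bfd):
--     data_num = {'1':0,'2':0,'3':0,'4':0,'5':0,'6':0,'7':0,'8':0,'9':0,'10':0,
--             '11':0,'12':0,'13':0,'14':0,'15':0,'16':0,'17':0,'18':0,'19':0,'20':0,}
--     #j=цифры, i[j] = YES|NO, i = all
--     for i in bfd:
--         for j in i:
--             for h in data_num:
--                 if h==str(j):
--                     data_num[h]+=1
--     return data_num
-- ===== SOURCE B (Python) =====
-- def read_bfd_all(bfd):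
--     # Key-major counting: flatten the input once into a list of normalized
--     # strings, then for each of the 20 fixed keys count its occurrences with
--     # list.count -- no mutable accumulator dict, no per-element key scan.
--     flat = [str(j) for i in bfd for j in i]
--     return {str(k): flat.count(str(k)) for k in range(1, 21)}
-- ===== Notes on version B (the rewrite author's own statement) =====
-- stated objective: alternative
-- what changed: B inverts the loop nesting: instead of A's element-major pass that scans the 20 dict keys and mutates counts for every element, B flattens the input once and builds the result key-major, computing each of the 20 entries independently as flat.count(str(k)).
import Mathlib
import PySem

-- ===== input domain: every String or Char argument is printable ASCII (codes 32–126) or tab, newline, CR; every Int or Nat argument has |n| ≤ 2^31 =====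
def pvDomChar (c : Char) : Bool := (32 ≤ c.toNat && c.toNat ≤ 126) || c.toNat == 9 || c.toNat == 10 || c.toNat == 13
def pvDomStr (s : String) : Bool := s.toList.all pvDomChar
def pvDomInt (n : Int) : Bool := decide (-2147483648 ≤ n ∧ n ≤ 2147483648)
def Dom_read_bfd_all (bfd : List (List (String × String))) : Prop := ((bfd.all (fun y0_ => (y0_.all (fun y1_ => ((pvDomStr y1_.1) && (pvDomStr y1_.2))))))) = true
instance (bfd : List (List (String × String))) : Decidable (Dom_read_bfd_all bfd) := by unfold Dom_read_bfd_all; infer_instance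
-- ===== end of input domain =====

-- B inverts the nesting: it flattens the keys once and builds the result key-major,
-- counting each of the 20 fixed keys independently (objective: alternative; same value).

-- ===== PORT A =====

-- the dict literal data_num (keys '1'..'20', all values 0)
def pyDataNum : PySem.Dict String Int := PySem.Dict.ofList
  [("1",0),("2",0),("3",0),("4",0),("5",0),("6",0),("7",0),("8",0),("9",0),("10",0),
   ("11",0),("12",0),("13",0),("14",0),("15",0),("16",0),("17",0),("18",0),("19",0),("20",0)]

-- 'for j in i' iterates the keys of the inner dict i, so j is j.1 of the pair and str(j) = j.1;
-- 'for h in data_num' iterates the key view of the current dict (values may change meanwhile).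
def read_bfd_all (bfd : List (List (String × String))) : List (String × Int) :=
  (bfd.foldl (fun d i =>
    i.foldl (fun d j =>
      d.keys.foldl (fun d h =>
        if h == j.1 then d.modify h 0 (· + 1) else d) d) d) pyDataNum).items

-- ===== PORT B =====

-- flat = [str(j) for i in bfd for j in i]   (j ranges over the keys of the inner dict)
def pyFlat (bfd : List (List (String × String))) : List String :=
  bfd.flatMap (fun i => i.map (·.1))

-- {str(k): flat.count(str(k)) for k in range(1, 21)}
def read_bfd_all_alt (bfd : List (List (String × String))) : List (String × Int) :=
  ((PySem.List.pyRange 1 21 1).foldl (fun d k =>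
    d.insert (PySem.Int.toStr k)
      (PySem.List.count (pyFlat bfd) (PySem.Int.toStr k))) PySem.Dict.empty).items

-- ===== PRECONDITION & SPEC =====
def Spec_read_bfd_all (bfd : List (List (String × String))) (out : List (String × Int)) : Prop := out = read_bfd_all_alt bfd
instance (bfd : List (List (String × String))) (out : List (String × Int)) : Decidable (Spec_read_bfd_all bfd out) := by unfold Spec_read_bfd_all; infer_instance

-- ===== CLAIM (what is proved, stated in full; the proofs are below) =====
def Claim_equal_read_bfd_all : Prop := ∀ (bfd : List (List (String × String))), Dom_read_bfd_all bfd → Spec_read_bfd_all bfd (read_bfd_all bfd)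

-- ===== LEMMAS AND PROOFS =====

-- the 20 fixed keys
def keys20 : List String :=
  ["1","2","3","4","5","6","7","8","9","10","11","12","13","14","15","16","17","18","19","20"]

-- A's scan does nothing on keys that do not match.
theorem scan_absent (s : String) (ks : List String) (hs : s ∉ ks)
    (d : PySem.Dict String Int) :
    ks.foldl (fun d h => if h == s then d.modify h 0 (· + 1) else d) d = d := by
  induction ks generalizing d with
  | nil => rfl
  | cons b u ihu =>
    have hb : (b == s) = false := by
      rw [beq_eq_false_iff_ne]; intro hbs; exact hs (hbs ▸ List.mem_cons_self)
    simp only [List.foldl, hb, Bool.false_eq_true, if_false]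
    exact ihu (fun hm => hs (List.mem_cons_of_mem _ hm)) d

-- A's scan over a nodup key list increments at most the one matching key.
theorem scan_eq (s : String) (ks : List String) (hnd : ks.Nodup)
    (d : PySem.Dict String Int) :
    ks.foldl (fun d h => if h == s then d.modify h 0 (· + 1) else d) d
      = if s ∈ ks then d.modify s 0 (· + 1) else d := by
  induction ks generalizing d with
  | nil => simp
  | cons a t ih =>
    simp only [List.nodup_cons] at hnd
    by_cases ha : a = s
    · subst ha
      simp only [List.foldl, BEq.rfl, if_true, List.mem_cons, true_or]
      exact scan_absent a t hnd.1 _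
    · have hba : (a == s) = false := by rw [beq_eq_false_iff_ne]; exact ha
      simp only [List.foldl, hba, Bool.false_eq_true, if_false]
      rw [ih hnd.2 d]
      simp [List.mem_cons, Ne.symm ha]

-- one A-step on a key s, as a function of the key stream only
def gStep (d : PySem.Dict String Int) (s : String) : PySem.Dict String Int :=
  if s ∈ keys20 then d.modify s 0 (· + 1) else d

theorem keys_gStep (d : PySem.Dict String Int) (s : String) (hd : d.keys = keys20) :
    (gStep d s).keys = keys20 := by
  unfold gStep
  split_ifs with hs
  · rw [PySem.Dict.keys_modify, PySem.Dict.keys_insert_of_contains]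
    · exact hd
    · rw [PySem.Dict.contains_eq_decide_mem_keys, hd]; simpa using hs
  · exact hd

-- A's nested fold consumes exactly the flattened key stream.
theorem A_fold_eq_gfold (bfd : List (List (String × String)))
    (d : PySem.Dict String Int) (hd : d.keys = keys20) :
    bfd.foldl (fun d i =>
      i.foldl (fun d j =>
        d.keys.foldl (fun d h => if h == j.1 then d.modify h 0 (· + 1) else d) d) d) d
      = (pyFlat bfd).foldl gStep d := by
  induction bfd generalizing d with
  | nil => rfl
  | cons i rest ih =>
    simp only [List.foldl, pyFlat, List.flatMap_cons, List.foldl_append]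
    have hin : ∀ (i : List (String × String)) (d : PySem.Dict String Int), d.keys = keys20 →
        i.foldl (fun d j =>
          d.keys.foldl (fun d h => if h == j.1 then d.modify h 0 (· + 1) else d) d) d
          = (i.map (·.1)).foldl gStep d ∧
        ((i.map (·.1)).foldl gStep d).keys = keys20 := by
      intro i
      induction i with
      | nil => exact fun d hd => ⟨rfl, hd⟩
      | cons j u ihu =>
        intro d hd
        have hnd : d.keys.Nodup := hd ▸ (by decide : keys20.Nodup)
        have hstep : d.keys.foldl (fun d h => if h == j.1 then d.modify h 0 (· + 1) else d) d
            = gStep d j.1 := by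
          rw [scan_eq _ _ hnd, hd]; rfl
        have hk := keys_gStep d j.1 hd
        obtain ⟨h1, h2⟩ := ihu (gStep d j.1) hk
        exact ⟨by simp only [List.foldl, List.map_cons, hstep, h1], by
          simpa only [List.map_cons, List.foldl] using h2⟩
    obtain ⟨h1, h2⟩ := hin i d hd
    rw [h1]
    exact ih _ h2

-- lookups after the gStep fold: each key of keys20 accumulates its count in the stream
theorem getD_gfold (l : List String) (d : PySem.Dict String Int) (hd : d.keys = keys20)
    (k : String) (hk : k ∈ keys20) :
    ((l.foldl gStep d).getD k 0 = d.getD k 0 + l.count k ∧ (l.foldl gStep d).keys = keys20) := by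
  induction l generalizing d with
  | nil => simpa using hd
  | cons s t ih =>
    simp only [List.foldl, List.count_cons]
    obtain ⟨h1, h2⟩ := ih (gStep d s) (keys_gStep d s hd)
    refine ⟨?_, h2⟩
    rw [h1]
    unfold gStep
    by_cases hs : s ∈ keys20
    · simp only [hs, if_true, PySem.Dict.getD_modify]
      by_cases hks : k = s
      · subst hks; simp; omega
      · have : (s == k) = false := by rw [beq_eq_false_iff_ne]; exact fun h => hks h.symm
        simp [hks, this]
    · have : (s == k) = false := by
        rw [beq_eq_false_iff_ne]; intro h; exact hs (h ▸ hk)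
      simp [hs, this]

-- ===== VERDICT (by name: the statement is the Claim_ definition above) =====
theorem read_bfd_all_spec : Claim_equal_read_bfd_all := by
  intro bfd _
  unfold Spec_read_bfd_all read_bfd_all read_bfd_all_alt
  -- A's side: items of the gStep fold from pyDataNum
  rw [A_fold_eq_gfold bfd pyDataNum (by decide)]
  have hA : ∀ k ∈ keys20,
      ((pyFlat bfd).foldl gStep pyDataNum).getD k 0 = (pyFlat bfd).count k := by
    intro k hk
    have := (getD_gfold (pyFlat bfd) pyDataNum (by decide) k hk).1
    rw [this]
    have : pyDataNum.getD k 0 = 0 := by fin_cases hk <;> decide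
    omega
  have hAkeys : ((pyFlat bfd).foldl gStep pyDataNum).keys = keys20 :=
    (getD_gfold (pyFlat bfd) pyDataNum (by decide) "1" (by decide)).2
  rw [PySem.Dict.items_eq_map_keys _ (hAkeys ▸ (by decide : keys20.Nodup)) 0, hAkeys]
  -- B's side: the projection fold appends 20 fresh keys to the empty dict
  rw [show PySem.List.pyRange 1 21 1 =
      [1,2,3,4,5,6,7,8,9,10,11,12,13,14,15,16,17,18,19,20] from by decide]
  rw [PySem.Dict.items_foldl_insert_fresh
      [1,2,3,4,5,6,7,8,9,10,11,12,13,14,15,16,17,18,19,20] PySem.Int.toStr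
      (fun a => (PySem.List.count (pyFlat bfd) (PySem.Int.toStr a) : Int)) PySem.Dict.empty
      (fun a _ => PySem.Dict.contains_empty _) (by decide)]
  rw [show ([1,2,3,4,5,6,7,8,9,10,11,12,13,14,15,16,17,18,19,20] : List Int).map
        (fun a => (PySem.Int.toStr a, (PySem.List.count (pyFlat bfd) (PySem.Int.toStr a) : Int)))
      = keys20.map (fun s => (s, (PySem.List.count (pyFlat bfd) s : Int))) from by
    rw [show (fun (a : Int) => (PySem.Int.toStr a, (PySem.List.count (pyFlat bfd) (PySem.Int.toStr a) : Int)))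
        = (fun s => (s, (PySem.List.count (pyFlat bfd) s : Int))) ∘ PySem.Int.toStr from rfl,
      ← List.map_map]
    rfl]
  rw [show (PySem.Dict.empty : PySem.Dict String Int).items = [] from rfl, List.nil_append]
  apply List.map_congr_left
  intro k hk
  rw [hA k hk, PySem.List.count_eq]
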